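-- pv_equiv track=rewrite | github.com/davidweisscode/utils | sort_person_blocks.py | split_blocks
-- ===== SOURCE A (Python) =====
-- def split_blocks(content):
--     blocks = []
--     current_block = []
--
--     for line in content:
--         if line.startswith("# "):  # Indicates the start of a new person block
--             if current_block:
--                 blocks.append(current_block)
--             current_block = [line]  # Start a new block
--         else:
--             current_block.append(line)  # Add to the current block
--
--     # Append the last block
--     if current_block:
--         blocks.append(current_block)
--
--     return blocks
-- ===== SOURCE B (Python) =====
-- def split_blocks(content):
--     # Segment scan with two indices: each block runs from its first line to the
--     # line before the next header; no running accumulator, blocks are sliced out.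
--     lines = list(content)
--     n = len(lines)
--     blocks = []
--     i = 0
--     while i < n:
--         j = i + 1
--         while j < n and not lines[j].startswith("# "):
--             j += 1
--         blocks.append(lines[i:j])
--         i = j
--     return blocks
-- ===== Notes on version B (the rewrite author's own statement) =====
-- stated objective: alternative
-- what changed: B replaces A's single forward pass with a running accumulator and end-of-loop flush by a two-pointer segment scan: for each block start it advances a second index to the next header and slices the block out of the materialized line list, never maintaining a partial block.
import Mathlib
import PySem

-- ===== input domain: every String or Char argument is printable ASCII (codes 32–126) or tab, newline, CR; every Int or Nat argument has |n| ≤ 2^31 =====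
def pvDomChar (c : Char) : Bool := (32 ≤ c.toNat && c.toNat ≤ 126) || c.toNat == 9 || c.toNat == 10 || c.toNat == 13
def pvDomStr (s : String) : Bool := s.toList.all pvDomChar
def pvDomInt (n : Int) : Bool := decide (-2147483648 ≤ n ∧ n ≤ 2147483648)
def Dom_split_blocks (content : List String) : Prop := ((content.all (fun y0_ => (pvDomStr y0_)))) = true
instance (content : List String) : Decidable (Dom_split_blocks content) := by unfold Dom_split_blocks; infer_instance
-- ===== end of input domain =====

-- B replaces A's accumulator pass by a two-pointer segment scan: each block is the
-- slice from its first line up to (excluding) the next header.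

-- ===== PORT A =====
-- loop body of A: header starts a new block (flushing the current one if non-empty)
def aStep (st : List (List String) × List String) (line : String) :
    List (List String) × List String :=
  if PySem.Str.startswith line "# " then
    ((if st.2 ≠ [] then st.1 ++ [st.2] else st.1), [line])
  else
    (st.1, st.2 ++ [line])

def split_blocks (content : List String) : List (List String) :=
  let p := content.foldl aStep ([], [])
  if p.2 ≠ [] then p.1 ++ [p.2] else p.1

-- ===== PORT B =====
-- outer while of B on the suffix starting at i: the inner while advancing j to the
-- next header, together with the slice lines[i:j], is takeWhile/dropWhile of the
-- non-header predicate on the lines after position i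
def altLoop : List String → List (List String)
  | [] => []
  | x :: rest =>
    (x :: rest.takeWhile (fun l => !PySem.Str.startswith l "# ")) ::
      altLoop (rest.dropWhile (fun l => !PySem.Str.startswith l "# "))
termination_by l => l.length
decreasing_by
  exact Nat.lt_succ_of_le (List.length_dropWhile_le _ _)

def split_blocks_alt (content : List String) : List (List String) :=
  altLoop content

-- ===== PRECONDITION & SPEC =====
def Spec_split_blocks (content : List String) (out : List (List String)) : Prop := out = split_blocks_alt content
instance (content : List String) (out : List (List String)) : Decidable (Spec_split_blocks content out) := by unfold Spec_split_blocks; infer_instance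

-- ===== CLAIM (what is proved, stated in full; the proofs are below) =====
def Claim_equal_split_blocks : Prop := ∀ (content : List String), Dom_split_blocks content → Spec_split_blocks content (split_blocks content)

-- ===== LEMMAS AND PROOFS =====

-- A's fold is independent of already-collected blocks: they are a prefix of the result.
theorem foldl_shift : ∀ (l : List String) (bs : List (List String)) (cur : List String),
    List.foldl aStep (bs, cur) l
      = (bs ++ (List.foldl aStep (([] : List (List String)), cur) l).1,
         (List.foldl aStep (([] : List (List String)), cur) l).2)
  | [], bs, cur => by simp
  | x :: l, bs, cur => by
    simp only [List.foldl_cons, aStep]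
    by_cases h : PySem.Str.startswith x "# " = true
    · simp only [h, if_true]
      by_cases hc : cur = []
      · simp only [hc, ne_eq, not_true_eq_false, if_false]
        exact foldl_shift l bs [x]
      · simp only [ne_eq, hc, not_false_eq_true, if_true, List.nil_append]
        rw [foldl_shift l (bs ++ [cur]) [x], foldl_shift l [cur] [x]]
        simp
    · simp only [Bool.not_eq_true] at h
      simp only [h, Bool.false_eq_true, if_false]
      exact foldl_shift l bs (cur ++ [x])

-- bridge: A's fold from a non-empty current block `cur` produces cur extended to the
-- next header, followed by the segments of the remaining suffix.
theorem bridge : ∀ (l : List String) (cur : List String), cur ≠ [] →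
    (if (List.foldl aStep (([] : List (List String)), cur) l).2 ≠ [] then
        (List.foldl aStep (([] : List (List String)), cur) l).1
          ++ [(List.foldl aStep (([] : List (List String)), cur) l).2]
      else (List.foldl aStep (([] : List (List String)), cur) l).1)
    = (cur ++ l.takeWhile (fun s => !PySem.Str.startswith s "# ")) ::
        altLoop (l.dropWhile (fun s => !PySem.Str.startswith s "# "))
  | [], cur, hc => by simp [hc, altLoop]
  | x :: l, cur, hc => by
    simp only [List.foldl_cons, aStep]
    by_cases h : PySem.Str.startswith x "# " = true
    · have h' : PySem.Chars.startswith x.toList ['#', ' '] = true := by simpa using h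
      simp only [h, if_true, ne_eq, hc, not_false_eq_true, List.nil_append]
      rw [foldl_shift l [cur] [x]]
      have ih := bridge l [x] (by simp)
      by_cases h2 : (List.foldl aStep (([] : List (List String)), [x]) l).2 = []
      · simp only [h2, ne_eq, not_true_eq_false, if_false] at ih ⊢
        simp [altLoop, ih, h']
      · simp only [ne_eq, h2, not_false_eq_true, if_true] at ih ⊢
        simp [altLoop, ih, h']
    · simp only [Bool.not_eq_true] at h
      have h' : PySem.Chars.startswith x.toList ['#', ' '] = false := by simpa using h
      simp only [h, Bool.false_eq_true, if_false]
      rw [bridge l (cur ++ [x]) (by simp)]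
      simp [h']

theorem split_blocks_eq_alt (content : List String) :
    split_blocks content = split_blocks_alt content := by
  cases content with
  | nil => simp [split_blocks, split_blocks_alt, altLoop]
  | cons x l =>
    have hstep : aStep ([], []) x = ([], [x]) := by
      unfold aStep
      by_cases h : PySem.Str.startswith x "# " = true <;> simp only [h, Bool.false_eq_true, if_true, if_false, ne_eq, not_true_eq_false, List.nil_append]
    unfold split_blocks split_blocks_alt
    simp only [List.foldl_cons, hstep]
    rw [bridge l [x] (by simp)]
    simp [altLoop]

-- ===== VERDICT (by name: the statement is the Claim_ definition above) =====
theorem split_blocks_spec : Claim_equal_split_blocks := by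
  intro content _
  unfold Spec_split_blocks
  exact split_blocks_eq_alt content
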